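-- pv_equiv track=rewrite | github.com/NuclearMonk/AoC2023 | day11/main.py | galaxy_distance
-- ===== SOURCE A (Python) =====
-- def galaxy_distance(a,b,vertical, horizontal, expansion_factor =2):
--     ax,ay = a
--     bx,by = b
--     distance = abs(ax-bx) + abs(ay-by)
--     for x in range(min(ax,bx), max(ax,bx)):
--         if x not in horizontal:
--             distance += expansion_factor -1
--     for y in range(min(ay,by), max(ay,by)):
--         if y not in vertical:
--             distance += expansion_factor -1
--     return distance
-- ===== SOURCE B (Python) =====
-- def _expanded(p, q, filled, factor):
--     lo, hi = (p, q) if p <= q else (q, p)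
--     crossed = sum(1 for c in set(filled) if lo <= c < hi)
--     return (hi - lo) + (factor - 1) * ((hi - lo) - crossed)
--
--
-- def galaxy_distance(a, b, vertical, horizontal, expansion_factor=2):
--     ax, ay = a
--     bx, by = b
--     return (_expanded(ax, bx, horizontal, expansion_factor)
--             + _expanded(ay, by, vertical, expansion_factor))
-- ===== Notes on version B (the rewrite author's own statement) =====
-- stated objective: alternative
-- what changed: Replaces A's per-coordinate scan over every integer in the x/y ranges (with a list membership test each step) by a closed-form count: base Manhattan distance plus (factor-1) times (span minus the number of distinct blocked coordinates inside the half-open interval), computed by one pass over each set; cost moves from O(span*m) to O(m), which wins for wide spans but not on the measured inputs.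
import Mathlib
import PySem

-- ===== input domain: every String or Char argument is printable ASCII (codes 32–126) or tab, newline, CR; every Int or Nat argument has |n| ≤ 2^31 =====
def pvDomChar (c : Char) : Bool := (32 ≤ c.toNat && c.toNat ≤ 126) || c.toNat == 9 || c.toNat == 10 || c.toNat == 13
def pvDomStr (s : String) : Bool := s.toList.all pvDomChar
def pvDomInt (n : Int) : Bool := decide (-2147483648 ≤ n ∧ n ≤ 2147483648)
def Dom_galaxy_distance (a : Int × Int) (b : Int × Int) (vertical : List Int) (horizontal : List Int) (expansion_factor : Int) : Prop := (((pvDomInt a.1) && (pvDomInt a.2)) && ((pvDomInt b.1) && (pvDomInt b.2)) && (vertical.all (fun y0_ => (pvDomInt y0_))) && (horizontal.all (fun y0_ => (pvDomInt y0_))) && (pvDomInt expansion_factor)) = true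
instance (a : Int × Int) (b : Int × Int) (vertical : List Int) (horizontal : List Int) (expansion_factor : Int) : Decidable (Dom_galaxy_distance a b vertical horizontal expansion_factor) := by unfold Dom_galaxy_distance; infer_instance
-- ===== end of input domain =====

-- B replaces A's per-coordinate scan of the whole x/y ranges by a closed-form
-- count of the distinct blocked coordinates inside each interval (objective: alternative).

-- ===== PORT A =====
def galaxy_distance (a : Int × Int) (b : Int × Int) (vertical : List Int) (horizontal : List Int) (expansion_factor : Int) : Int :=
  let ax := a.1; let ay := a.2
  let bx := b.1; let by_ := b.2
  let distance := |ax - bx| + |ay - by_|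
  let distance := (PySem.List.pyRange (min ax bx) (max ax bx) 1).foldl
    (fun d x => if x ∈ horizontal then d else d + (expansion_factor - 1)) distance
  (PySem.List.pyRange (min ay by_) (max ay by_) 1).foldl
    (fun d y => if y ∈ vertical then d else d + (expansion_factor - 1)) distance

-- ===== PORT B =====
def pvExpanded (p q : Int) (filled : List Int) (factor : Int) : Int :=
  let lo := if p ≤ q then p else q
  let hi := if p ≤ q then q else p
  let crossed : Int := ((PySem.Set.ofList filled).countP (fun c => decide (lo ≤ c ∧ c < hi)) : Int)
  (hi - lo) + (factor - 1) * ((hi - lo) - crossed)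

def galaxy_distance_alt (a : Int × Int) (b : Int × Int) (vertical : List Int) (horizontal : List Int) (expansion_factor : Int) : Int :=
  pvExpanded a.1 b.1 horizontal expansion_factor + pvExpanded a.2 b.2 vertical expansion_factor

-- ===== PRECONDITION & SPEC =====
def Spec_galaxy_distance (a : Int × Int) (b : Int × Int) (vertical : List Int) (horizontal : List Int) (expansion_factor : Int) (out : Int) : Prop := out = galaxy_distance_alt a b vertical horizontal expansion_factor
instance (a : Int × Int) (b : Int × Int) (vertical : List Int) (horizontal : List Int) (expansion_factor : Int) (out : Int) : Decidable (Spec_galaxy_distance a b vertical horizontal expansion_factor out) := by unfold Spec_galaxy_distance; infer_instance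

-- ===== CLAIM (what is proved, stated in full; the proofs are below) =====
def Claim_equal_galaxy_distance : Prop := ∀ (a : Int × Int) (b : Int × Int) (vertical : List Int) (horizontal : List Int) (expansion_factor : Int), Dom_galaxy_distance a b vertical horizontal expansion_factor → Spec_galaxy_distance a b vertical horizontal expansion_factor (galaxy_distance a b vertical horizontal expansion_factor)

-- ===== LEMMAS AND PROOFS =====

-- the accumulator loop adds c once per element failing p
theorem pv_foldl_if (H : List Int) (c : Int) (l : List Int) (d : Int) :
    l.foldl (fun acc x => if x ∈ H then acc else acc + c) d
      = d + c * (l.countP (fun x => !decide (x ∈ H)) : Int) := by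
  induction l generalizing d with
  | nil => simp
  | cons x xs ih =>
    by_cases hx : x ∈ H <;> simp [hx, ih]; ring

-- counting members of H in [lo,hi) over the range equals counting over the dedup of H
theorem pv_count_range_eq (lo hi : Int) (H : List Int) :
    ((PySem.List.pyRange lo hi 1).countP (fun x => decide (x ∈ H)) : Int)
      = ((PySem.Set.ofList H).countP (fun c => decide (lo ≤ c ∧ c < hi)) : Int) := by
  have h1 : ((PySem.List.pyRange lo hi 1).filter (fun x => decide (x ∈ H))).Nodup :=
    (PySem.List.nodup_pyRange_one lo hi).filter _
  have h2 : (((PySem.Set.ofList H : List Int)).filter (fun c => decide (lo ≤ c ∧ c < hi))).Nodup :=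
    (PySem.Set.nodup_ofList H).filter _
  have hperm : List.Perm ((PySem.List.pyRange lo hi 1).filter (fun x => decide (x ∈ H)))
      (((PySem.Set.ofList H : List Int)).filter (fun c => decide (lo ≤ c ∧ c < hi))) := by
    refine (List.perm_ext_iff_of_nodup h1 h2).mpr ?_
    intro x
    simp [List.mem_filter, PySem.List.mem_pyRange_one, PySem.Set.mem_ofList]
    tauto
  simp [List.countP_eq_length_filter, hperm.length_eq]

-- one axis of A equals one pvExpanded term of B (added to the base distance separately)
theorem pv_axis (p q ef : Int) (H : List Int) (d : Int) :
    (PySem.List.pyRange (min p q) (max p q) 1).foldl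
        (fun acc x => if x ∈ H then acc else acc + (ef - 1)) (d + |p - q|)
      = d + pvExpanded p q H ef := by
  have hlo : min p q = if p ≤ q then p else q := by rw [min_def]
  have hhi : max p q = if p ≤ q then q else p := by rw [max_def]
  set lo := if p ≤ q then p else q with hlo'
  set hi := if p ≤ q then q else p with hhi'
  have hle : lo ≤ hi := by rw [hlo', hhi']; split_ifs <;> omega
  have habs : |p - q| = hi - lo := by
    rw [hlo', hhi']; split_ifs with h
    · rw [abs_sub_comm, abs_of_nonneg (by omega)]
    · rw [abs_of_nonneg (by omega)]
  have hlen : ((PySem.List.pyRange lo hi 1).length : Int) = hi - lo := by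
    rw [PySem.List.length_pyRange_one]; omega
  have hsplit : ((PySem.List.pyRange lo hi 1).countP (fun x => !decide (x ∈ H)) : Int)
      = (hi - lo) - ((PySem.List.pyRange lo hi 1).countP (fun x => decide (x ∈ H)) : Int) := by
    have h := List.length_eq_countP_add_countP (l := PySem.List.pyRange lo hi 1) (p := fun x => decide (x ∈ H))
    have h2 : (PySem.List.pyRange lo hi 1).countP (fun a => decide (¬ (decide (a ∈ H) = true)))
        = (PySem.List.pyRange lo hi 1).countP (fun x => !decide (x ∈ H)) :=
      List.countP_congr (fun x _ => by simp)
    rw [h2] at h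
    omega
  rw [pv_foldl_if, habs, hlo, hhi, hsplit, pv_count_range_eq]
  unfold pvExpanded
  rw [← hlo', ← hhi']
  ring

-- ===== VERDICT (by name: the statement is the Claim_ definition above) =====
theorem galaxy_distance_spec : Claim_equal_galaxy_distance := by
  intro a b vertical horizontal ef _
  unfold Spec_galaxy_distance galaxy_distance galaxy_distance_alt
  have h1 := pv_axis a.1 b.1 ef horizontal |a.2 - b.2|
  have h2 := pv_axis a.2 b.2 ef vertical (pvExpanded a.1 b.1 horizontal ef)
  simp only []
  rw [show |a.1 - b.1| + |a.2 - b.2| = |a.2 - b.2| + |a.1 - b.1| from by ring, h1,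
      show |a.2 - b.2| + pvExpanded a.1 b.1 horizontal ef
         = pvExpanded a.1 b.1 horizontal ef + |a.2 - b.2| from by ring, h2]
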